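-- pv_equiv track=rewrite | github.com/NandoSerrano85/pandatech-gsb-api | app/core/util.py | select_csv_data_by_type
-- ===== SOURCE A (Python) =====
-- def select_csv_data_by_type(csv_data, local_path, type=''):
--     index_data = []
--     selected_data={'Title':[], 'Type':[], 'Size':[]}
--
--     if type == '':
--         for n in range(len(csv_data['Type'])):
--             for _ in range(int(csv_data['Total'][n])):
--                 if csv_data['Type'][n] == "UVDTF 40oz":
--                     selected_data['Title'].append("{}/Top/{}.png".format(local_path, csv_data['Product title'][n]))
--                     selected_data['Type'].append('UVDTF 40oz Top')
--                     selected_data['Size'].append('Top')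
--                     selected_data['Title'].append("{}/Bottom/{} (Bottom).png".format(local_path, csv_data['Product title'][n]))
--                     selected_data['Type'].append('UVDTF 40oz Bottom')
--                     selected_data['Size'].append('Bottom')
--                 else:
--                     selected_data['Title'].append("{}/{}.png".format(local_path, csv_data['Product title'][n]))
--                     selected_data['Type'].append(csv_data['Type'][n])
--                     selected_data['Size'].append(csv_data['Size'][n])
--
--         return selected_data
--
--     for n in range(len(csv_data['Type'])):
--         if csv_data['Type'][n] == type:
--             index_data.append(n)
--
--     for n in index_data:
--         for _ in range(int(csv_data['Total'][n])):
--             if csv_data['Type'][n] == "UVDTF 40oz":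
--                 selected_data['Title'].append("{}/Top/{}.png".format(local_path, csv_data['Product title'][n]))
--                 selected_data['Type'].append('UVDTF 40oz Top')
--                 selected_data['Size'].append('Top')
--                 selected_data['Title'].append("{}/Bottom/{} (Bottom).png".format(local_path, csv_data['Product title'][n]))
--                 selected_data['Type'].append('UVDTF 40oz Bottom')
--                 selected_data['Size'].append('Bottom')
--             else:
--                 selected_data['Title'].append("{}/{}.png".format(local_path, csv_data['Product title'][n]))
--                 selected_data['Type'].append(csv_data['Type'][n])
--                 selected_data['Size'].append(csv_data['Size'][n])
--     return selected_data
-- ===== SOURCE B (Python) =====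
-- def select_csv_data_by_type(csv_data, local_path, type=''):
--     types = csv_data['Type']
--     indices = [n for n in range(len(types)) if type == '' or types[n] == type]
--     records = []
--     for n in indices:
--         total = int(csv_data['Total'][n])
--         if total > 0:
--             if types[n] == "UVDTF 40oz":
--                 title = csv_data['Product title'][n]
--                 unit = [("{}/Top/{}.png".format(local_path, title), 'UVDTF 40oz Top', 'Top'),
--                         ("{}/Bottom/{} (Bottom).png".format(local_path, title), 'UVDTF 40oz Bottom', 'Bottom')]
--             else:
--                 unit = [("{}/{}.png".format(local_path, csv_data['Product title'][n]),
--                          types[n], csv_data['Size'][n])]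
--             records += unit * total
--     return {'Title': [r[0] for r in records],
--             'Type': [r[1] for r in records],
--             'Size': [r[2] for r in records]}
-- ===== Notes on version B (the rewrite author's own statement) =====
-- stated objective: simpler
-- what changed: Replaces A's two duplicated branch bodies and three lockstep-appended column lists by one filtered index list and a single list of (title, type, size) records built with unit*total, transposed into the three columns at the end.
import Mathlib
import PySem

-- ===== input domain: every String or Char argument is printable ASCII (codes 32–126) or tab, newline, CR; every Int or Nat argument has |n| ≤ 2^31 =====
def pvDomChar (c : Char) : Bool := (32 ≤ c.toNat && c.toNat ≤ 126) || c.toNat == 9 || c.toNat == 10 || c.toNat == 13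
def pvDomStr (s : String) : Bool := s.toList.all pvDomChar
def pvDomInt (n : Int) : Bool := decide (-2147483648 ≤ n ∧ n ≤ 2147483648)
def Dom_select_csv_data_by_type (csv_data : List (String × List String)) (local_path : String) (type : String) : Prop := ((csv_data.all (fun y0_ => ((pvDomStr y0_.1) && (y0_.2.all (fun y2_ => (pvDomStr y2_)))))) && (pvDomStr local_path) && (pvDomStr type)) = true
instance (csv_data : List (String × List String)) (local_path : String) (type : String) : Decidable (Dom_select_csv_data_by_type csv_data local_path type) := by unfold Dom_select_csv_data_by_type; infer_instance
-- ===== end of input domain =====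

-- B replaces A's two duplicated lockstep-three-list loops by one filtered index list, a single
-- list of (title, type, size) records extended with unit * total, transposed at the end (simpler).

-- ===== PORT A =====
-- dict lookup csv_data[k]: first match; default [] only where Python raises KeyError (outside Pre_)
def pvDictGet (d : List (String × List String)) (k : String) : List String :=
  (List.lookup k d).getD []

-- int(csv_data['Total'][n]); default 0 only where Python raises (outside Pre_)
def pvTotal (csv_data : List (String × List String)) (n : Int) : Int :=
  (PySem.Int.ofStr? (PySem.List.pyGetD (pvDictGet csv_data "Total") n "")).getD 0

-- the duplicated inner 'for _ in range(int(...)): if … append×3 else append×3' block of A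
def pvARow (csv_data : List (String × List String)) (local_path : String)
    (acc : List String × List String × List String) (n : Int) :
    List String × List String × List String :=
  (PySem.List.pyRange 0 (pvTotal csv_data n) 1).foldl (fun acc2 _ =>
    if PySem.List.pyGetD (pvDictGet csv_data "Type") n "" == "UVDTF 40oz" then
      (((acc2.1 ++ [local_path ++ "/Top/" ++ PySem.List.pyGetD (pvDictGet csv_data "Product title") n "" ++ ".png"])
          ++ [local_path ++ "/Bottom/" ++ PySem.List.pyGetD (pvDictGet csv_data "Product title") n "" ++ " (Bottom).png"]),
       ((acc2.2.1 ++ ["UVDTF 40oz Top"]) ++ ["UVDTF 40oz Bottom"]),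
       ((acc2.2.2 ++ ["Top"]) ++ ["Bottom"]))
    else
      (acc2.1 ++ [local_path ++ "/" ++ PySem.List.pyGetD (pvDictGet csv_data "Product title") n "" ++ ".png"],
       acc2.2.1 ++ [PySem.List.pyGetD (pvDictGet csv_data "Type") n ""],
       acc2.2.2 ++ [PySem.List.pyGetD (pvDictGet csv_data "Size") n ""])) acc

def select_csv_data_by_type (csv_data : List (String × List String)) (local_path : String) (type : String) : List (String × List String) :=
  if type == "" then
    let r := (PySem.List.pyRange 0 ((pvDictGet csv_data "Type").length : Int) 1).foldl
      (pvARow csv_data local_path) ([], [], [])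
    [("Title", r.1), ("Type", r.2.1), ("Size", r.2.2)]
  else
    let index_data := (PySem.List.pyRange 0 ((pvDictGet csv_data "Type").length : Int) 1).foldl
      (fun acc n => if PySem.List.pyGetD (pvDictGet csv_data "Type") n "" == type then acc ++ [n] else acc) []
    let r := index_data.foldl (pvARow csv_data local_path) ([], [], [])
    [("Title", r.1), ("Type", r.2.1), ("Size", r.2.2)]

-- ===== PORT B =====
-- the record(s) one row contributes once
def pvUnit (csv_data : List (String × List String)) (local_path : String) (n : Int) :
    List (String × String × String) :=
  if PySem.List.pyGetD (pvDictGet csv_data "Type") n "" == "UVDTF 40oz" then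
    [(local_path ++ "/Top/" ++ PySem.List.pyGetD (pvDictGet csv_data "Product title") n "" ++ ".png", "UVDTF 40oz Top", "Top"),
     (local_path ++ "/Bottom/" ++ PySem.List.pyGetD (pvDictGet csv_data "Product title") n "" ++ " (Bottom).png", "UVDTF 40oz Bottom", "Bottom")]
  else
    [(local_path ++ "/" ++ PySem.List.pyGetD (pvDictGet csv_data "Product title") n "" ++ ".png",
      PySem.List.pyGetD (pvDictGet csv_data "Type") n "",
      PySem.List.pyGetD (pvDictGet csv_data "Size") n "")]

def select_csv_data_by_type_alt (csv_data : List (String × List String)) (local_path : String) (type : String) : List (String × List String) :=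
  let types := pvDictGet csv_data "Type"
  let indices := (PySem.List.pyRange 0 (types.length : Int) 1).filter
    (fun n => type == "" || PySem.List.pyGetD types n "" == type)
  let records := indices.foldl (fun recs n =>
    if 0 < pvTotal csv_data n then recs ++ PySem.List.pyRepeat (pvUnit csv_data local_path n) (pvTotal csv_data n)
    else recs) []
  [("Title", records.map (·.1)), ("Type", records.map (·.2.1)), ("Size", records.map (·.2.2))]

-- ===== PRECONDITION & SPEC =====
-- Pre_: the keys and indices Python A actually touches exist and each touched Total entry parses as int.
def pvRowOK (csv_data : List (String × List String)) (ty : List String) (n : Nat) : Bool :=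
  match List.lookup "Total" csv_data with
  | none => false
  | some tl =>
    match tl[n]? with
    | none => false
    | some s =>
      match PySem.Int.ofStr? s with
      | none => false
      | some t =>
        if t ≤ 0 then true
        else
          match List.lookup "Product title" csv_data with
          | none => false
          | some pt =>
            decide (n < pt.length) &&
            (ty[n]! == "UVDTF 40oz" ||
              match List.lookup "Size" csv_data with
              | none => false
              | some sz => decide (n < sz.length))

def pvPreB (csv_data : List (String × List String)) (type : String) : Bool :=
  match List.lookup "Type" csv_data with
  | none => false
  | some ty => (List.range ty.length).all (fun n =>
      !(type == "" || ty[n]! == type) || pvRowOK csv_data ty n)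

def Pre_select_csv_data_by_type (csv_data : List (String × List String)) (local_path : String) (type : String) : Prop :=
  pvPreB csv_data type = true

instance (csv_data : List (String × List String)) (local_path : String) (type : String) : Decidable (Pre_select_csv_data_by_type csv_data local_path type) := by unfold Pre_select_csv_data_by_type; infer_instance

def pvWitness_select_csv_data_by_type : (List (String × List String)) × String × String :=
  ([("Type", ["UVDTF 40oz", "Cup"]), ("Total", ["2", "1"]), ("Product title", ["A", "B"]), ("Size", ["", "16oz"])], "path", "")

def Spec_select_csv_data_by_type (csv_data : List (String × List String)) (local_path : String) (type : String) (out : List (String × List String)) : Prop := out = select_csv_data_by_type_alt csv_data local_path type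
instance (csv_data : List (String × List String)) (local_path : String) (type : String) (out : List (String × List String)) : Decidable (Spec_select_csv_data_by_type csv_data local_path type out) := by unfold Spec_select_csv_data_by_type; infer_instance

-- ===== CLAIM (what is proved, stated in full; the proofs are below) =====
def Claim_equal_select_csv_data_by_type : Prop := ∀ (csv_data : List (String × List String)) (local_path : String) (type : String), Dom_select_csv_data_by_type csv_data local_path type → Pre_select_csv_data_by_type csv_data local_path type → Spec_select_csv_data_by_type csv_data local_path type (select_csv_data_by_type csv_data local_path type)

-- ===== LEMMAS AND PROOFS =====

-- a loop body appending the three projections of a fixed record list u, run once per loop iteration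
theorem pv_foldl3_const (l : List Int) (u : List (String × String × String))
    (a b c : List String) :
    l.foldl (fun acc (_ : Int) =>
      (acc.1 ++ u.map (·.1), acc.2.1 ++ u.map (·.2.1), acc.2.2 ++ u.map (·.2.2))) (a, b, c)
    = (a ++ ((List.replicate l.length u).flatten).map (·.1),
       b ++ ((List.replicate l.length u).flatten).map (·.2.1),
       c ++ ((List.replicate l.length u).flatten).map (·.2.2)) := by
  induction l generalizing a b c with
  | nil => simp
  | cons x xs ih => simp [List.foldl_cons, ih, List.replicate_succ]

theorem pvARow_eq (csv_data : List (String × List String)) (local_path : String)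
    (acc : List String × List String × List String) (n : Int) :
    pvARow csv_data local_path acc n
    = (acc.1 ++ (PySem.List.pyRepeat (pvUnit csv_data local_path n) (pvTotal csv_data n)).map (·.1),
       acc.2.1 ++ (PySem.List.pyRepeat (pvUnit csv_data local_path n) (pvTotal csv_data n)).map (·.2.1),
       acc.2.2 ++ (PySem.List.pyRepeat (pvUnit csv_data local_path n) (pvTotal csv_data n)).map (·.2.2)) := by
  obtain ⟨a, b, c⟩ := acc
  unfold pvARow
  have hstep : (fun (acc2 : List String × List String × List String) (_ : Int) =>
    if PySem.List.pyGetD (pvDictGet csv_data "Type") n "" == "UVDTF 40oz" then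
      (((acc2.1 ++ [local_path ++ "/Top/" ++ PySem.List.pyGetD (pvDictGet csv_data "Product title") n "" ++ ".png"])
          ++ [local_path ++ "/Bottom/" ++ PySem.List.pyGetD (pvDictGet csv_data "Product title") n "" ++ " (Bottom).png"]),
       ((acc2.2.1 ++ ["UVDTF 40oz Top"]) ++ ["UVDTF 40oz Bottom"]),
       ((acc2.2.2 ++ ["Top"]) ++ ["Bottom"]))
    else
      (acc2.1 ++ [local_path ++ "/" ++ PySem.List.pyGetD (pvDictGet csv_data "Product title") n "" ++ ".png"],
       acc2.2.1 ++ [PySem.List.pyGetD (pvDictGet csv_data "Type") n ""],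
       acc2.2.2 ++ [PySem.List.pyGetD (pvDictGet csv_data "Size") n ""]))
    = (fun acc2 (_ : Int) =>
      (acc2.1 ++ (pvUnit csv_data local_path n).map (·.1),
       acc2.2.1 ++ (pvUnit csv_data local_path n).map (·.2.1),
       acc2.2.2 ++ (pvUnit csv_data local_path n).map (·.2.2))) := by
    funext acc2 m
    by_cases h : (PySem.List.pyGetD (pvDictGet csv_data "Type") n "" == "UVDTF 40oz") = true <;>
      simp [pvUnit, h]
  rw [hstep, pv_foldl3_const]
  simp [PySem.List.pyRepeat, PySem.List.length_pyRange_one]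

-- A's outer loop over any index list equals the transposed flatMap of per-row records
theorem pvAOuter_eq (csv_data : List (String × List String)) (local_path : String)
    (idx : List Int) (a b c : List String) :
    idx.foldl (pvARow csv_data local_path) (a, b, c)
    = (a ++ (idx.flatMap (fun n => PySem.List.pyRepeat (pvUnit csv_data local_path n) (pvTotal csv_data n))).map (·.1),
       b ++ (idx.flatMap (fun n => PySem.List.pyRepeat (pvUnit csv_data local_path n) (pvTotal csv_data n))).map (·.2.1),
       c ++ (idx.flatMap (fun n => PySem.List.pyRepeat (pvUnit csv_data local_path n) (pvTotal csv_data n))).map (·.2.2)) := by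
  induction idx generalizing a b c with
  | nil => simp
  | cons x xs ih => simp [List.foldl_cons, pvARow_eq, ih]

-- B's record loop equals the same flatMap (unit * total is [] when total ≤ 0)
theorem pvBRecords_eq (csv_data : List (String × List String)) (local_path : String)
    (idx : List Int) :
    idx.foldl (fun recs n =>
      if 0 < pvTotal csv_data n then recs ++ PySem.List.pyRepeat (pvUnit csv_data local_path n) (pvTotal csv_data n)
      else recs) []
    = idx.flatMap (fun n => PySem.List.pyRepeat (pvUnit csv_data local_path n) (pvTotal csv_data n)) := by
  have h : (fun (recs : List (String × String × String)) n =>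
      if 0 < pvTotal csv_data n then recs ++ PySem.List.pyRepeat (pvUnit csv_data local_path n) (pvTotal csv_data n)
      else recs)
    = (fun recs n => recs ++ PySem.List.pyRepeat (pvUnit csv_data local_path n) (pvTotal csv_data n)) := by
    funext recs n
    by_cases ht : 0 < pvTotal csv_data n
    · simp [ht]
    · have : (pvTotal csv_data n).toNat = 0 := by omega
      simp [ht, PySem.List.pyRepeat, this]
  rw [h, PySem.List.foldl_append_eq_flatMap]
  simp

-- ===== VERDICT (by name: the statement is the Claim_ definition above) =====
theorem select_csv_data_by_type_spec : Claim_equal_select_csv_data_by_type := by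
  intro csv_data local_path type _ _
  unfold Spec_select_csv_data_by_type select_csv_data_by_type select_csv_data_by_type_alt
  by_cases h : type = ""
  · subst h
    simp only [beq_self_eq_true, if_true, Bool.true_or]
    rw [List.filter_eq_self.2 (by intro n _; rfl)]
    rw [pvAOuter_eq, pvBRecords_eq]
    simp
  · have hb : (type == "") = false := by simp [h]
    simp only [hb, Bool.false_eq_true, if_false, Bool.false_or]
    rw [PySem.List.foldl_append_if_eq_filter]
    rw [List.nil_append, pvAOuter_eq, pvBRecords_eq]
    simp
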